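-- pv_equiv track=rewrite | github.com/Kulchandra-199/new_ai | main.py | process_conversations
-- ===== SOURCE A (Python) =====
-- def process_conversations(conversations):
--     processed = []
--     for conv in conversations:
--         history = []
--         for i in range(0, len(conv)-1, 2):
--             input_text = " [SEP] ".join(history + [conv[i]])
--             target_text = conv[i+1]
--             processed.append((input_text, target_text))
--             history.append(conv[i])
--             history.append(conv[i+1])
--     return processed
-- ===== SOURCE B (Python) =====
-- def process_conversations(conversations):
--     # Stateless single comprehension: the accumulated history at step i is
--     # exactly the prefix conv[:i], so each pair is computed directly from a slice.
--     return [
--         (" [SEP] ".join(conv[:i + 1]), conv[i + 1])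
--         for conv in conversations
--         for i in range(0, len(conv) - 1, 2)
--     ]
-- ===== Notes on version B (the rewrite author's own statement) =====
-- stated objective: simpler
-- what changed: Replaced the nested loops with a mutable history accumulator and an output list by a single stateless comprehension that computes each cumulative input directly as a prefix slice conv[:i+1].
import Mathlib
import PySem

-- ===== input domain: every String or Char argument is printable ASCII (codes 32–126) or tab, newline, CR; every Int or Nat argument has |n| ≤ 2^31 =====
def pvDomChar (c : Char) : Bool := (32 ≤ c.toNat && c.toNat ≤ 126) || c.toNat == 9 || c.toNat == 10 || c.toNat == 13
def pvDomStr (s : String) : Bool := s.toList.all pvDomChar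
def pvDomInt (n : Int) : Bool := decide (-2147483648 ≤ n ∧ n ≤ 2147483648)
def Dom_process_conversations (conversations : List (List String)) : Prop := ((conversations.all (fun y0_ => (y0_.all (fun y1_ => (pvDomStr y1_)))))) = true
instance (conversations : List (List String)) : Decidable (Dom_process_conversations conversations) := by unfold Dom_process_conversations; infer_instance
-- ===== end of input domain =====

-- B replaces A's mutable history accumulator and output list by one stateless
-- comprehension computing each cumulative input directly as a prefix slice (objective: simpler).


-- ===== PORT A =====
def process_conversations (conversations : List (List String)) : List (String × String) :=
  conversations.foldl
    (fun processed conv =>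
      ((PySem.List.pyRange 0 (PySem.List.len conv - 1) 2).foldl
        (fun (st : List (String × String) × List String) i =>
          let input_text := PySem.Str.join " [SEP] " (st.2 ++ [PySem.List.pyGetD conv i ""])
          let target_text := PySem.List.pyGetD conv (i + 1) ""
          (st.1 ++ [(input_text, target_text)],
           (st.2 ++ [PySem.List.pyGetD conv i ""]) ++ [PySem.List.pyGetD conv (i + 1) ""]))
        (processed, ([] : List String))).1)
    []

-- ===== PORT B =====
def process_conversations_alt (conversations : List (List String)) : List (String × String) :=
  conversations.flatMap (fun conv =>
    (PySem.List.pyRange 0 (PySem.List.len conv - 1) 2).map (fun i =>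
      (PySem.Str.join " [SEP] " (PySem.List.slice conv none (some (i + 1))),
       PySem.List.pyGetD conv (i + 1) "")))

-- ===== PRECONDITION & SPEC =====
def Spec_process_conversations (conversations : List (List String)) (out : List (String × String)) : Prop := out = process_conversations_alt conversations
instance (conversations : List (List String)) (out : List (String × String)) : Decidable (Spec_process_conversations conversations out) := by unfold Spec_process_conversations; infer_instance

-- ===== CLAIM (what is proved, stated in full; the proofs are below) =====
def Claim_equal_process_conversations : Prop := ∀ (conversations : List (List String)), Dom_process_conversations conversations → Spec_process_conversations conversations (process_conversations conversations)

-- ===== LEMMAS AND PROOFS =====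

-- range(0, n-1, 2) enumerates 2*k for k < n/2
theorem step2_range (n : Nat) :
    PySem.List.pyRange 0 ((n : Int) - 1) 2
      = (List.range (n / 2)).map (fun k => ((2 * k : Nat) : Int)) := by
  rw [PySem.List.pyRange_of_pos 0 ((n : Int) - 1) (by norm_num)]
  have hcount : (if (0 : Int) < (n : Int) - 1 then (((n : Int) - 1 - 0 + 2 - 1) / 2).toNat else 0) = n / 2 := by
    split_ifs with h
    · omega
    · omega
  rw [hcount]
  exact List.map_congr_left (fun k _ => by push_cast; ring)

-- inner-loop invariant: after m iterations, history = conv.take (2*m) and the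
-- emitted pairs are exactly B's per-conversation comprehension entries
theorem inner_inv (conv : List String) (m : Nat) (hm : 2 * m ≤ conv.length)
    (acc : List (String × String)) :
    ((List.range m).map (fun k => ((2 * k : Nat) : Int))).foldl
      (fun (st : List (String × String) × List String) i =>
        (st.1 ++ [(PySem.Str.join " [SEP] " (st.2 ++ [PySem.List.pyGetD conv i ""]),
                   PySem.List.pyGetD conv (i + 1) "")],
         (st.2 ++ [PySem.List.pyGetD conv i ""]) ++ [PySem.List.pyGetD conv (i + 1) ""]))
      (acc, ([] : List String))
    = (acc ++ (List.range m).map (fun k =>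
         (PySem.Str.join " [SEP] " (PySem.List.slice conv none (some (((2 * k : Nat) : Int) + 1))),
          PySem.List.pyGetD conv (((2 * k : Nat) : Int) + 1) "")),
       conv.take (2 * m)) := by
  induction m with
  | zero => simp
  | succ m ih =>
    have hm' : 2 * m ≤ conv.length := by omega
    rw [List.range_succ, List.map_append, List.foldl_append, ih hm', List.map_append]
    simp only [List.map_cons, List.map_nil, List.foldl_cons, List.foldl_nil]
    have hidx : (2 * m : Nat) < conv.length := by omega
    have hget : PySem.List.pyGetD conv ((2 * m : Nat) : Int) "" = conv[2 * m] := by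
      rw [PySem.List.pyGetD_eq_getElem conv "" (by positivity) (by exact_mod_cast hidx)]
      congr 1
    have htake : conv.take (2 * m) ++ [conv[2 * m]] = conv.take (2 * m + 1) := by
      rw [← List.concat_eq_append, List.take_concat_get]
    have hslice : PySem.List.slice conv none (some (((2 * m : Nat) : Int) + 1))
        = conv.take (2 * m + 1) := by
      rw [PySem.List.slice_to conv (by positivity)]
      congr 1
    have htake2 : (conv.take (2 * m) ++ [conv[2 * m]]) ++ [PySem.List.pyGetD conv (((2 * m : Nat) : Int) + 1) ""]
        = conv.take (2 * (m + 1)) := by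
      rw [htake]
      rcases Nat.lt_or_ge (2 * m + 1) conv.length with hlt | hge
      · have hget2 : PySem.List.pyGetD conv (((2 * m : Nat) : Int) + 1) "" = conv[2 * m + 1] := by
          have : ((2 * m : Nat) : Int) + 1 = ((2 * m + 1 : Nat) : Int) := by push_cast; ring
          rw [this, PySem.List.pyGetD_eq_getElem conv "" (by positivity) (by exact_mod_cast hlt)]
          congr 1
        rw [hget2]
        have h2 : 2 * (m + 1) = (2 * m + 1) + 1 := by omega
        rw [h2, ← List.concat_eq_append, List.take_concat_get]
      · omega
    rw [hget, htake2, htake, hslice, List.append_assoc]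

-- one conversation: A's inner loop emits exactly B's per-conversation list
theorem conv_eq (conv : List String) (acc : List (String × String)) :
    ((PySem.List.pyRange 0 (PySem.List.len conv - 1) 2).foldl
      (fun (st : List (String × String) × List String) i =>
        (st.1 ++ [(PySem.Str.join " [SEP] " (st.2 ++ [PySem.List.pyGetD conv i ""]),
                   PySem.List.pyGetD conv (i + 1) "")],
         (st.2 ++ [PySem.List.pyGetD conv i ""]) ++ [PySem.List.pyGetD conv (i + 1) ""]))
      (acc, ([] : List String))).1
    = acc ++ (PySem.List.pyRange 0 (PySem.List.len conv - 1) 2).map (fun i =>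
        (PySem.Str.join " [SEP] " (PySem.List.slice conv none (some (i + 1))),
         PySem.List.pyGetD conv (i + 1) "")) := by
  have hlen : PySem.List.len conv = (conv.length : Int) := by simp [PySem.List.len]
  rw [hlen, step2_range conv.length,
      inner_inv conv (conv.length / 2) (by omega) acc, List.map_map]
  rfl

-- ===== VERDICT (by name: the statement is the Claim_ definition above) =====
-- outer loop: A's foldl over conversations equals acc ++ B's flatMap
theorem outer_eq (convs : List (List String)) (acc : List (String × String)) :
    convs.foldl
      (fun processed conv =>
        ((PySem.List.pyRange 0 (PySem.List.len conv - 1) 2).foldl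
          (fun (st : List (String × String) × List String) i =>
            let input_text := PySem.Str.join " [SEP] " (st.2 ++ [PySem.List.pyGetD conv i ""])
            let target_text := PySem.List.pyGetD conv (i + 1) ""
            (st.1 ++ [(input_text, target_text)],
             (st.2 ++ [PySem.List.pyGetD conv i ""]) ++ [PySem.List.pyGetD conv (i + 1) ""]))
          (processed, ([] : List String))).1)
      acc
    = acc ++ convs.flatMap (fun conv =>
        (PySem.List.pyRange 0 (PySem.List.len conv - 1) 2).map (fun i =>
          (PySem.Str.join " [SEP] " (PySem.List.slice conv none (some (i + 1))),
           PySem.List.pyGetD conv (i + 1) ""))) := by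
  induction convs generalizing acc with
  | nil => simp
  | cons c cs ih =>
    rw [List.foldl_cons, ih, List.flatMap_cons, conv_eq, List.append_assoc]

theorem process_conversations_spec : Claim_equal_process_conversations := by
  intro conversations _
  unfold Spec_process_conversations process_conversations process_conversations_alt
  exact outer_eq conversations []
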